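-- pv_equiv track=rewrite | github.com/DevilCoders/Yandex | cloud/gauthling/yc_requests/lib/signing.py | remove_dot_segments
-- ===== SOURCE A (Python) =====
-- def remove_dot_segments(url):
--     # RFC 3986, section 5.2.4 "Remove Dot Segments"
--     if not url:
--         return ""
--
--     input_url = url.split("/")
--     output_list = []
--     for x in input_url:
--         if x and x != ".":
--             if x == "..":
--                 if output_list:
--                     output_list.pop()
--             else:
--                 output_list.append(x)
--
--     first = "/" if url[0] == "/" else ""
--     last = "/" if url[-1] == "/" and output_list else ""
--     return first + "/".join(output_list) + last
-- ===== SOURCE B (Python) =====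
-- def remove_dot_segments(url):
--     # Two-stage: filter out empty/'.' segments first, then resolve '..' by a
--     # right-to-left pass with an integer skip counter (no stack pops).
--     if not url:
--         return ""
--     parts = [s for s in url.split("/") if s and s != "."]
--     skip, result = 0, []
--     for seg in reversed(parts):
--         if seg == "..":
--             skip += 1
--         elif skip:
--             skip -= 1
--         else:
--             result.insert(0, seg)
--     head = "/" if url.startswith("/") else ""
--     tail = "/" if result and url.endswith("/") else ""
--     return head + "/".join(result) + tail
-- ===== Notes on version B (the rewrite author's own statement) =====
-- stated objective: alternative
-- what changed: Replaces A's left-to-right stack with guarded pops by a two-stage pipeline: a filter pass dropping empty and '.' segments, then a right-to-left fold with an integer skip counter that cancels '..' against preceding segments, with startswith/endswith-based slash reconstruction.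
import Mathlib
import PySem

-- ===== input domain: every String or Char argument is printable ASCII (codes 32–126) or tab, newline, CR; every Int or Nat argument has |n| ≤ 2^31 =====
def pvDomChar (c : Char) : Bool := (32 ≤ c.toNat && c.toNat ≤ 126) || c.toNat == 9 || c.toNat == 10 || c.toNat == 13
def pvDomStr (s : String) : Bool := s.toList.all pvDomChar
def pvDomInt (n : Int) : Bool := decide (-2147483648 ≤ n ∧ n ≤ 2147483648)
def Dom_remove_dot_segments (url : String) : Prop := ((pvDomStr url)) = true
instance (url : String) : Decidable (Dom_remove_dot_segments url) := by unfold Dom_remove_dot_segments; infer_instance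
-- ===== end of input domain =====

-- B replaces A's stack-with-pops by a filter pass plus a right-to-left fold with a skip counter; objective: alternative (same cost).

-- ===== PORT A =====
-- the for-loop of A: left-to-right over the segments, stack `output_list` (append at the end, pop = dropLast, guarded)
def rdsLoopA (out : List String) : List String → List String
  | [] => out
  | x :: xs =>
    if x ≠ "" ∧ x ≠ "." then
      if x = ".." then
        rdsLoopA (if out = [] then out else out.dropLast) xs
      else
        rdsLoopA (out ++ [x]) xs
    else rdsLoopA out xs

def remove_dot_segments (url : String) : String :=
  if url = "" then ""
  else
    let input_url := (PySem.Str.split? url "/").getD []   -- sep "/" ≠ "", so split? is some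
    let output_list := rdsLoopA [] input_url
    let first := if PySem.Str.pyGet? url 0 = some '/' then "/" else ""
    let last := if PySem.Str.pyGet? url (-1) = some '/' ∧ output_list ≠ [] then "/" else ""
    first ++ PySem.Str.join "/" output_list ++ last

-- ===== PORT B =====
-- one step of B's loop body: state (skip, result), '..' counts up, a pending skip consumes, else prepend
def rdsStep : Nat × List String → String → Nat × List String
  | (skip, res), seg =>
    if seg = ".." then (skip + 1, res)
    else if skip ≠ 0 then (skip - 1, res)
    else (skip, seg :: res)

def remove_dot_segments_alt (url : String) : String :=
  if url = "" then ""
  else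
    let parts := ((PySem.Str.split? url "/").getD []).filter (fun s => !(s == "") && !(s == "."))
    let result := (parts.reverse.foldl rdsStep (0, [])).2
    let head := if PySem.Str.startswith url "/" then "/" else ""
    let tail := if result ≠ [] ∧ PySem.Str.endswith url "/" = true then "/" else ""
    head ++ PySem.Str.join "/" result ++ tail

-- ===== PRECONDITION & SPEC =====
def Spec_remove_dot_segments (url : String) (out : String) : Prop := out = remove_dot_segments_alt url
instance (url : String) (out : String) : Decidable (Spec_remove_dot_segments url out) := by unfold Spec_remove_dot_segments; infer_instance

-- ===== CLAIM (what is proved, stated in full; the proofs are below) =====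
def Claim_equal_remove_dot_segments : Prop := ∀ (url : String), Dom_remove_dot_segments url → Spec_remove_dot_segments url (remove_dot_segments url)

-- ===== LEMMAS AND PROOFS =====

-- reference right-to-left reduction of the UNFILTERED segment list: (pending '..' count, kept segments in order)
def rdsBr : List String → Nat × List String
  | [] => (0, [])
  | x :: xs =>
    let p := rdsBr xs
    if x = "" ∨ x = "." then p
    else if x = ".." then (p.1 + 1, p.2)
    else if p.1 > 0 then (p.1 - 1, p.2)
    else (p.1, x :: p.2)

-- A's stack loop computes the kept-segments component of rdsBr
theorem rdsLoopA_eq_br (l : List String) : ∀ (out : List String),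
    rdsLoopA out l = out.take (out.length - (rdsBr l).1) ++ (rdsBr l).2 := by
  induction l with
  | nil => intro out; simp [rdsLoopA, rdsBr]
  | cons x xs ih =>
    intro out
    by_cases h1 : x = "" ∨ x = "."
    · have hn : ¬ (x ≠ "" ∧ x ≠ ".") := by tauto
      simp only [rdsLoopA, rdsBr, if_neg hn, if_pos h1]
      exact ih out
    · have h1' : x ≠ "" ∧ x ≠ "." := by tauto
      by_cases h2 : x = ".."
      · simp only [rdsLoopA, rdsBr, if_pos h1', if_neg h1, if_pos h2]
        rcases List.eq_nil_or_concat out with rfl | ⟨ys, y, rfl⟩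
        · simp [ih]
        · simp only [List.concat_eq_append]
          rw [if_neg (by simp), show (ys ++ [y]).dropLast = ys from by simp, ih ys]
          have hk : (ys ++ [y]).length - (((rdsBr xs).1 + 1, (rdsBr xs).2) : Nat × List String).1
              = ys.length - (rdsBr xs).1 := by simp
          rw [hk, List.take_append_of_le_length (Nat.sub_le _ _)]
      · simp only [rdsLoopA, rdsBr, if_pos h1', if_neg h1, if_neg h2]
        rw [ih (out ++ [x])]
        by_cases h3 : (rdsBr xs).1 > 0
        · simp only [if_pos h3]
          have hk : (out ++ [x]).length - (rdsBr xs).1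
              = out.length - ((((rdsBr xs).1 - 1, (rdsBr xs).2) : Nat × List String)).1 := by
            simp; omega
          rw [hk, List.take_append_of_le_length (Nat.sub_le _ _)]
        · simp only [if_neg h3]
          have h0 : (rdsBr xs).1 = 0 := by omega
          rw [h0]
          rw [List.take_of_length_le (by simp)]
          simp

-- rdsBr ignores exactly the segments B's filter pass removes, and then agrees with rdsStep folded from the right
theorem rdsBr_eq_foldr_filter (l : List String) :
    rdsBr l = (l.filter (fun s => !(s == "") && !(s == "."))).foldr (fun x p => rdsStep p x) (0, []) := by
  induction l with
  | nil => simp [rdsBr]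
  | cons x xs ih =>
    by_cases h1 : x = "" ∨ x = "."
    · have hf : (!(x == "") && !(x == ".")) = false := by
        rcases h1 with rfl | rfl <;> decide
      have hfc : List.filter (fun s => !(s == "") && !(s == ".")) (x :: xs)
          = List.filter (fun s => !(s == "") && !(s == ".")) xs := by
        simp [hf]
      rw [hfc]
      simp only [rdsBr, if_pos h1]
      exact ih
    · have hf : (!(x == "") && !(x == ".")) = true := by
        simp [not_or] at h1; simp [h1.1, h1.2]
      have hfc : List.filter (fun s => !(s == "") && !(s == ".")) (x :: xs)
          = x :: List.filter (fun s => !(s == "") && !(s == ".")) xs := by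
        simp [hf]
      rw [hfc, List.foldr_cons, ← ih]
      simp only [rdsBr, if_neg h1]
      rcases hb : rdsBr xs with ⟨k, res⟩
      by_cases h2 : x = ".."
      · simp [rdsStep, h2]
      · by_cases h3 : k = 0 <;> simp [rdsStep, h2, h3]

-- the head test: url[0] == '/' iff url.startswith('/')
theorem head_iff (url : String) :
    (PySem.Str.pyGet? url 0 = some '/') ↔ PySem.Str.startswith url "/" = true := by
  rw [PySem.Str.startswith_eq, PySem.Chars.startswith_iff]
  simp only [PySem.Str.pyGet?_eq, PySem.Chars.pyGet?_eq_listPyGet?, PySem.List.pyGet?_zero]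
  show _ ↔ ['/'] <+: url.toList
  cases url.toList with
  | nil => simp
  | cons c cs => simp [List.cons_prefix_cons, eq_comm]

-- the tail test: url[-1] == '/' iff url.endswith('/')
theorem tail_iff (url : String) :
    (PySem.Str.pyGet? url (-1) = some '/') ↔ PySem.Str.endswith url "/" = true := by
  rw [PySem.Str.endswith_eq, PySem.Chars.endswith_iff]
  simp only [PySem.Str.pyGet?_eq, PySem.Chars.pyGet?_eq_listPyGet?, PySem.List.pyGet?_neg_one]
  show url.toList.getLast? = some '/' ↔ ['/'] <:+ url.toList
  rw [← List.reverse_prefix, ← List.head?_reverse]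
  cases url.toList.reverse with
  | nil => simp
  | cons c cs => simp [List.cons_prefix_cons, eq_comm]

-- ===== VERDICT (by name: the statement is the Claim_ definition above) =====
theorem remove_dot_segments_spec : Claim_equal_remove_dot_segments := by
  intro url _
  unfold Spec_remove_dot_segments remove_dot_segments remove_dot_segments_alt
  by_cases h : url = ""
  · simp [h]
  · rw [if_neg h, if_neg h]
    dsimp only
    have hlists : rdsLoopA [] ((PySem.Str.split? url "/").getD []) =
        (((((PySem.Str.split? url "/").getD []).filter
            (fun s => !(s == "") && !(s == "."))).reverse.foldl rdsStep (0, [])).2 : List String) := by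
      rw [List.foldl_reverse, ← rdsBr_eq_foldr_filter, rdsLoopA_eq_br]
      simp
    rw [hlists]
    simp only [head_iff url, tail_iff url]
    congr 1
    exact if_congr and_comm rfl rfl
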